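-- pv_equiv track=rewrite | github.com/jackyhope/showroom | YuRen/resumeCrawl/func_51.py | first_show
-- ===== SOURCE A (Python) =====
-- def first_show(s, list_1):
--     list2 = []
--     for ss1 in list_1:
--         if ss1 in s:
--             ss1_inx = s.index(ss1)
--             list2.append(ss1_inx)
--         else:
--             pass
--     return min(list2)
-- ===== SOURCE B (Python) =====
-- def first_show(s, list_1):
--     # position-first scan: return the earliest index where any pattern starts
--     for i in range(len(s) + 1):
--         for p in list_1:
--             if s.startswith(p, i):
--                 return i
--     raise ValueError("min() arg is an empty sequence")
-- ===== Notes on version B (the rewrite author's own statement) =====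
-- stated objective: faster
-- what changed: A loops over all patterns, collects each pattern's first-occurrence index and takes min of the list; B scans string positions left-to-right and returns at the first position where any pattern starts, so it stops at the answer instead of completing a full search per pattern.
import Mathlib
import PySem

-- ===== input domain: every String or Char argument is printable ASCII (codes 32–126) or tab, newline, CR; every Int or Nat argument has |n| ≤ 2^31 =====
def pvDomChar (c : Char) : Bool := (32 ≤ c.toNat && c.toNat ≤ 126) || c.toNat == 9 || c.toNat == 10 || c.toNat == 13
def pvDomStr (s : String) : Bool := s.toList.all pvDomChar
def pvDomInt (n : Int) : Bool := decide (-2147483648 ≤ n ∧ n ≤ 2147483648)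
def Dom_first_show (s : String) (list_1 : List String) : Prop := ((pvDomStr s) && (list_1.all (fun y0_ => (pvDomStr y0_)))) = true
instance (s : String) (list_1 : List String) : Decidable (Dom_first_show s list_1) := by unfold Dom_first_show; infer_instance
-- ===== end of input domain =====

-- B replaces A's pattern-by-pattern index collection + min with a single left-to-right
-- position scan that returns at the first position where any pattern starts (alternative decomposition).

-- ===== PORT A =====
def first_show (s : String) (list_1 : List String) : Int :=
  let list2 : List Int := list_1.foldl
    (fun acc ss1 => if PySem.Str.isIn ss1 s then acc ++ [PySem.Str.find s ss1] else acc) []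
  (PySem.List.min? list2 (fun x => x)).getD 0   -- min([]) raises ValueError: excluded by Pre_

-- ===== PORT B =====
-- inner loop of Source B: first i in the list at which some pattern starts; [] = ValueError (outside Pre_)
def fsLoop (cs : List Char) (ps : List (List Char)) : List Nat → Int
  | [] => 0
  | i :: rest =>
    if ps.any (fun p => PySem.Chars.startswith (cs.drop i) p) then (i : Int)
    else fsLoop cs ps rest

def first_show_alt (s : String) (list_1 : List String) : Int :=
  fsLoop s.toList (list_1.map String.toList) (List.range (s.toList.length + 1))

-- ===== PRECONDITION & SPEC =====
-- Pre_ excludes exactly the inputs where no pattern occurs in s: there A's min([]) raises ValueError.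
def Pre_first_show (s : String) (list_1 : List String) : Prop :=
  list_1.any (fun p => PySem.Str.isIn p s) = true
instance (s : String) (list_1 : List String) : Decidable (Pre_first_show s list_1) := by
  unfold Pre_first_show; infer_instance

def pvWitness_first_show : String × List String := ("abcb", ["b", "xa"])

def Spec_first_show (s : String) (list_1 : List String) (out : Int) : Prop := out = first_show_alt s list_1
instance (s : String) (list_1 : List String) (out : Int) : Decidable (Spec_first_show s list_1 out) := by unfold Spec_first_show; infer_instance

-- ===== CLAIM (what is proved, stated in full; the proofs are below) =====
def Claim_equal_first_show : Prop := ∀ (s : String) (list_1 : List String), Dom_first_show s list_1 → Pre_first_show s list_1 → Spec_first_show s list_1 (first_show s list_1)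

-- ===== LEMMAS AND PROOFS =====

theorem fsLoop_range' (cs : List Char) (ps : List (List Char)) (m : Nat)
    (hP : ps.any (fun p => PySem.Chars.startswith (cs.drop m) p) = true)
    (hmin : ∀ i < m, ps.any (fun p => PySem.Chars.startswith (cs.drop i) p) = false) :
    ∀ (k n : Nat), k ≤ m → m < k + n → fsLoop cs ps (List.range' k n) = (m : Int) := by
  intro k n
  induction n generalizing k with
  | zero => omega
  | succ n ih =>
    intro hk hlt
    rw [List.range'_succ]
    by_cases hkm : k = m
    · subst hkm
      simp [fsLoop, hP]
    · have hklt : k < m := lt_of_le_of_ne hk hkm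
      simp only [fsLoop, hmin k hklt]
      simp only [Bool.false_eq_true, if_false]
      exact ih (k + 1) (by omega) (by omega)

theorem first_show_spec_aux (s : String) (list_1 : List String)
    (hpre : list_1.any (fun p => PySem.Str.isIn p s) = true) :
    first_show s list_1 = first_show_alt s list_1 := by
  classical
  set cs := s.toList with hcs
  set ps := list_1.map String.toList with hps
  -- A's list2
  have hlist2 : list_1.foldl
      (fun acc ss1 => if PySem.Str.isIn ss1 s then acc ++ [PySem.Str.find s ss1] else acc) ([] : List Int)
      = ((list_1.filter (fun p => PySem.Str.isIn p s)).map (fun p => PySem.Str.find s p)) := by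
    simpa using PySem.List.foldl_append_if (fun p => PySem.Str.isIn p s) (fun p => PySem.Str.find s p) list_1 ([] : List Int)
  set list2 := ((list_1.filter (fun p => PySem.Str.isIn p s)).map (fun p => PySem.Str.find s p)) with hl2
  -- nonempty
  obtain ⟨q0, hq0mem, hq0in⟩ := List.any_eq_true.mp hpre
  have hne : list2 ≠ [] := by
    have : PySem.Str.find s q0 ∈ list2 := by
      exact List.mem_map_of_mem (List.mem_filter.mpr ⟨hq0mem, hq0in⟩)
    intro h; rw [h] at this; exact (List.not_mem_nil) this
  obtain ⟨v, hv⟩ : ∃ v, PySem.List.min? list2 (fun x => x) = some v := by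
    rcases h : PySem.List.min? list2 (fun x => x) with _ | v
    · exact absurd ((PySem.List.min?_eq_none_iff _ _).mp h) hne
    · exact ⟨v, rfl⟩
  have hA : first_show s list_1 = v := by
    simp only [first_show, hlist2, hv, Option.getD_some]
  -- v is the find of some matching pattern
  have hvmem := PySem.List.min?_mem hv
  obtain ⟨q1, hq1f, hq1v⟩ := List.mem_map.mp hvmem
  have hq1mem : q1 ∈ list_1 := (List.mem_filter.mp hq1f).1
  have hq1in : PySem.Str.isIn q1 s = true := (List.mem_filter.mp hq1f).2
  have hvmin : ∀ y ∈ list2, v ≤ y := by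
    intro y hy; exact PySem.List.min?_isMin hv y hy
  -- on Chars
  have hq1in' : PySem.Chars.isIn q1.toList cs = true := by
    simpa [hcs] using hq1in
  have hv0 : 0 ≤ v := by
    rw [← hq1v]
    simp only [PySem.Str.find_eq]
    exact (PySem.Chars.find_nonneg_iff _ _).mpr ((PySem.Chars.isIn_iff_infix _ _).mp hq1in')
  have hvfind : v = PySem.Chars.find cs q1.toList := by
    rw [← hq1v]; simp [hcs]
  have hspec := PySem.Chars.find_spec (s := cs) (sub := q1.toList) (by rw [← hvfind]; exact hv0)
  -- the position m
  set m := v.toNat with hm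
  have hPm : ps.any (fun p => PySem.Chars.startswith (cs.drop m) p) = true := by
    refine List.any_eq_true.mpr ⟨q1.toList, List.mem_map_of_mem hq1mem, ?_⟩
    refine (PySem.Chars.startswith_iff _ _).mpr ?_
    have := hspec.1
    rw [← hvfind] at this
    exact this
  have hPlt : ∀ i < m, ps.any (fun p => PySem.Chars.startswith (cs.drop i) p) = false := by
    intro i hi
    by_contra h
    obtain ⟨p, hpmem, hpst⟩ := List.any_eq_true.mp (Bool.of_not_eq_false h)
    obtain ⟨q, hqmem, hqp⟩ := List.mem_map.mp hpmem
    subst hqp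
    have hpref : q.toList <+: cs.drop i := (PySem.Chars.startswith_iff _ _).mp hpst
    have hqin : PySem.Chars.isIn q.toList cs = true :=
      (PySem.Chars.exists_prefix_drop_iff_isIn _ _).mp ⟨i, hpref⟩
    have hf0 : 0 ≤ PySem.Chars.find cs q.toList :=
      (PySem.Chars.find_nonneg_iff _ _).mpr ((PySem.Chars.isIn_iff_infix _ _).mp hqin)
    have hfspec := PySem.Chars.find_spec (s := cs) (sub := q.toList) hf0
    have hfle : (PySem.Chars.find cs q.toList).toNat ≤ i := by
      by_contra hgt
      exact hfspec.2 i (by omega) hpref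
    have hqin' : PySem.Str.isIn q s = true := by simpa [hcs] using hqin
    have hmemf : PySem.Str.find s q ∈ list2 :=
      List.mem_map_of_mem (List.mem_filter.mpr ⟨hqmem, hqin'⟩)
    have hvle : v ≤ PySem.Str.find s q := hvmin _ hmemf
    have : PySem.Str.find s q = PySem.Chars.find cs q.toList := by simp [hcs]
    rw [this] at hvle
    omega
  have hmlt : m < cs.length + 1 := by
    have := PySem.Chars.find_le_length (s := cs) (sub := q1.toList)
    rw [← hvfind] at this
    omega
  have hB : first_show_alt s list_1 = (m : Int) := by
    rw [first_show_alt, List.range_eq_range']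
    exact fsLoop_range' cs ps m hPm hPlt 0 (cs.length + 1) (Nat.zero_le m) (by omega)
  rw [hA, hB, hm]
  omega

-- ===== VERDICT (by name: the statement is the Claim_ definition above) =====
theorem first_show_spec : Claim_equal_first_show := by
  intro s list_1 _ hpre
  unfold Spec_first_show
  exact first_show_spec_aux s list_1 hpre
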